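-- pv_equiv track=rewrite | github.com/vlasmirnov/Juno | operations/maf.py | getMatchSlices
-- ===== SOURCE A (Python) =====
-- def getMatchSlices(matchColsList):
--     matchSlices = []
--     matches = len(matchColsList[0]) if len(matchColsList) > 0 else 0
--     n1 = 0
--     for n2 in range(matches):
--         if n2 == matches - 1 or max(matchCols[n2+1] - matchCols[n2] - 1 for matchCols in matchColsList) > 0:
--             matchSlices.append( list(range(n1, n2 + 1)) )
--             n1 = n2 + 1
--     return matchSlices
-- ===== SOURCE B (Python) =====
-- def getMatchSlices(matchColsList):
--     # Row-major break-set union: each row contributes its own set of break positions,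
--     # then the sorted union of breaks cuts the column range into slices.
--     matches = len(matchColsList[0]) if matchColsList else 0
--     if matches == 0:
--         return []
--     breaks = set()
--     for mc in matchColsList:
--         for n in range(matches - 1):
--             if mc[n + 1] - mc[n] > 1:
--                 breaks.add(n)
--     slices = []
--     start = 0
--     for e in sorted(breaks) + [matches - 1]:
--         slices.append(list(range(start, e + 1)))
--         start = e + 1
--     return slices
-- ===== Notes on version B (the rewrite author's own statement) =====
-- stated objective: alternative
-- what changed: Replaces A's column-major fused scan (one pass over positions with a max() over all rows and an inline running slice start) with a row-major algorithm: each row is scanned on its own to contribute break positions to a set, the union is sorted, and the slices are cut from the column range at the sorted break points.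
import Mathlib
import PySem

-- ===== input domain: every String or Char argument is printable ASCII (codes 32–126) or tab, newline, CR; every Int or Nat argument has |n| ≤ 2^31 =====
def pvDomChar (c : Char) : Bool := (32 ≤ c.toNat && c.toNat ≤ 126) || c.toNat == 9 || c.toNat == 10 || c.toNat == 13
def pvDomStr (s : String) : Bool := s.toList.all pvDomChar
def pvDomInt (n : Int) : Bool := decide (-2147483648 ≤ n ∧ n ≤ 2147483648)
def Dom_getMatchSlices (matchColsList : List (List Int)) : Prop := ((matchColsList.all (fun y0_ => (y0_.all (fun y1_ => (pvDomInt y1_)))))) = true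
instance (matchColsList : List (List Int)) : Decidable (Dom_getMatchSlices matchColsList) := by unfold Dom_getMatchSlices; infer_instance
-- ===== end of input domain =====

-- B replaces A's column-major fused scan with a row-major algorithm: each row
-- contributes break positions to a set, the sorted union cuts the column range.

-- ===== PORT A =====
-- Literal port of A: one fold over range(matchesN) carrying (matchSlices, n1);
-- the gap test is max(mc[n2+1] - mc[n2] - 1 for mc in matchColsList) > 0.
-- pyGetD is used for mc[i]; exact under Pre_ (all accessed indices in range).
def getMatchSlices (matchColsList : List (List Int)) : List (List Int) :=
  let matchesN : Int := if 0 < matchColsList.length then (matchColsList.headI.length : Int) else 0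
  (((PySem.List.pyRange 0 matchesN 1).foldl (fun (st : List (List Int) × Int) n2 =>
    if n2 = matchesN - 1 ∨
        0 < (PySem.List.max? (matchColsList.map (fun mc =>
              PySem.List.pyGetD mc (n2 + 1) 0 - PySem.List.pyGetD mc n2 0 - 1)) (fun x => x)).getD 0
    then (st.1 ++ [PySem.List.pyRange st.2 (n2 + 1) 1], n2 + 1)
    else st) ([], 0)).1)

-- ===== PORT B =====
-- Literal port of B: outer fold over the rows, inner fold over range(matches-1)
-- adding break positions to a PySem.Set; then the emit-fold over sorted(breaks)+[matches-1].
def getMatchSlices_alt (matchColsList : List (List Int)) : List (List Int) :=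
  let matchesN : Int := if matchColsList ≠ [] then (matchColsList.headI.length : Int) else 0
  if matchesN = 0 then []
  else
    let breaks : PySem.Set Int := matchColsList.foldl (fun s mc =>
      (PySem.List.pyRange 0 (matchesN - 1) 1).foldl (fun s n =>
        if 1 < PySem.List.pyGetD mc (n + 1) 0 - PySem.List.pyGetD mc n 0
        then PySem.Set.add s n else s) s) PySem.Set.empty
    ((PySem.List.sorted breaks (fun x => x) false ++ [matchesN - 1]).foldl
      (fun (st : List (List Int) × Int) e =>
        (st.1 ++ [PySem.List.pyRange st.2 (e + 1) 1], e + 1)) ([], 0)).1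

-- ===== PRECONDITION & SPEC =====
-- Pre_ excludes exactly the inputs where Python A raises an IndexError: when the first
-- row has length ≥ 2 (so the gap test is evaluated), every row must be at least that long.
def Pre_getMatchSlices (matchColsList : List (List Int)) : Prop :=
  2 ≤ matchColsList.headI.length →
    ∀ l ∈ matchColsList, matchColsList.headI.length ≤ l.length
instance (matchColsList : List (List Int)) : Decidable (Pre_getMatchSlices matchColsList) := by
  unfold Pre_getMatchSlices; infer_instance

def pvWitness_getMatchSlices : List (List Int) := [[0, 1, 2, 5, 6], [3, 4, 5, 9, 10]]

def Spec_getMatchSlices (matchColsList : List (List Int)) (out : List (List Int)) : Prop := out = getMatchSlices_alt matchColsList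
instance (matchColsList : List (List Int)) (out : List (List Int)) : Decidable (Spec_getMatchSlices matchColsList out) := by unfold Spec_getMatchSlices; infer_instance

-- ===== CLAIM (what is proved, stated in full; the proofs are below) =====
def Claim_equal_getMatchSlices : Prop := ∀ (matchColsList : List (List Int)), Dom_getMatchSlices matchColsList → Pre_getMatchSlices matchColsList → Spec_getMatchSlices matchColsList (getMatchSlices matchColsList)

-- ===== LEMMAS AND PROOFS =====

-- running max of an Int list is positive iff some contributing value is positive
theorem pv_foldl_max_pos (xs : List Int) : ∀ x : Int,
    (0 < xs.foldl max x) ↔ (0 < x ∨ ∃ y ∈ xs, 0 < y) := by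
  induction xs with
  | nil => intro x; simp
  | cons a t ih =>
    intro x
    simp only [List.foldl_cons, ih, List.exists_mem_cons_iff, lt_max_iff]
    tauto

-- A's max-based gap test agrees with the pointwise "some row has gap > 1" test
theorem pv_cond_iff (L : List (List Int)) (hL : L ≠ []) (f : List Int → Int) :
    (0 < (PySem.List.max? (L.map (fun mc => f mc - 1)) (fun x => x)).getD 0)
      ↔ ∃ mc ∈ L, 1 < f mc := by
  cases L with
  | nil => exact absurd rfl hL
  | cons a t =>
    rw [List.map_cons, PySem.List.max?_id_cons]
    simp only [Option.getD_some, pv_foldl_max_pos, List.exists_mem_cons_iff, List.mem_map]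
    constructor
    · rintro (h | ⟨y, ⟨mc, hmc, rfl⟩, h0⟩)
      · exact Or.inl (by omega)
      · exact Or.inr ⟨mc, hmc, by omega⟩
    · rintro (h | ⟨mc, hmc, h0⟩)
      · exact Or.inl (by omega)
      · exact Or.inr ⟨f mc - 1, ⟨mc, hmc, rfl⟩, by omega⟩

-- membership in the inner break-collecting fold over one row
theorem pv_mem_inner (p : Int → Prop) [DecidablePred p] :
    ∀ (ns : List Int) (s : PySem.Set Int) (x : Int),
      x ∈ ns.foldl (fun s n => if p n then PySem.Set.add s n else s) s
        ↔ x ∈ s ∨ (x ∈ ns ∧ p x) := by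
  intro ns
  induction ns with
  | nil => simp
  | cons a t ih =>
    intro s x
    by_cases h : p a
    · simp only [List.foldl_cons, if_pos h, ih, PySem.Set.mem_add, List.mem_cons]
      constructor
      · rintro ((hs | rfl) | ht); exacts [Or.inl hs, Or.inr ⟨Or.inl rfl, h⟩,
          Or.inr ⟨Or.inr ht.1, ht.2⟩]
      · rintro (hs | ⟨(rfl | ht), hp⟩); exacts [Or.inl (Or.inl hs), Or.inl (Or.inr rfl),
          Or.inr ⟨ht, hp⟩]
    · simp only [List.foldl_cons, if_neg h, ih, List.mem_cons]
      constructor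
      · rintro (hs | ht); exacts [Or.inl hs, Or.inr ⟨Or.inr ht.1, ht.2⟩]
      · rintro (hs | ⟨(rfl | ht), hp⟩); exacts [Or.inl hs, absurd hp h, Or.inr ⟨ht, hp⟩]

-- the inner fold preserves Nodup
theorem pv_nodup_inner (p : Int → Prop) [DecidablePred p] :
    ∀ (ns : List Int) (s : PySem.Set Int), s.Nodup →
      (ns.foldl (fun s n => if p n then PySem.Set.add s n else s) s).Nodup := by
  intro ns
  induction ns with
  | nil => intro s hs; exact hs
  | cons a t ih =>
    intro s hs
    by_cases h : p a
    · simpa [h] using ih _ (PySem.Set.nodup_add _ _ hs)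
    · simpa [h] using ih _ hs

-- membership in the whole break set (outer fold over rows)
theorem pv_mem_breaks (g : List Int → Int → Prop) [∀ mc n, Decidable (g mc n)] (ns : List Int) :
    ∀ (rows : List (List Int)) (s : PySem.Set Int) (x : Int),
      x ∈ rows.foldl (fun s mc =>
            ns.foldl (fun s n => if g mc n then PySem.Set.add s n else s) s) s
        ↔ x ∈ s ∨ (x ∈ ns ∧ ∃ mc ∈ rows, g mc x) := by
  intro rows
  induction rows with
  | nil => simp
  | cons r t ih =>
    intro s x
    simp only [List.foldl_cons, ih, pv_mem_inner (g r) ns s x, List.exists_mem_cons_iff]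
    tauto

-- the whole break set is Nodup
theorem pv_nodup_breaks (g : List Int → Int → Prop) [∀ mc n, Decidable (g mc n)] (ns : List Int) :
    ∀ (rows : List (List Int)) (s : PySem.Set Int), s.Nodup →
      (rows.foldl (fun s mc =>
         ns.foldl (fun s n => if g mc n then PySem.Set.add s n else s) s) s).Nodup := by
  intro rows
  induction rows with
  | nil => intro s hs; exact hs
  | cons r t ih =>
    intro s hs
    exact ih _ (pv_nodup_inner (g r) ns s hs)

-- fused scan = emit-fold over the filtered break indices
theorem pv_fused_eq_twopass (c : Int → Prop) [DecidablePred c] :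
    ∀ (ns : List Int) (ms : List (List Int)) (n1 : Int),
      (ns.foldl (fun (st : List (List Int) × Int) n2 =>
          if c n2 then (st.1 ++ [PySem.List.pyRange st.2 (n2 + 1) 1], n2 + 1) else st) (ms, n1))
        = ((ns.filter (fun n2 => decide (c n2))).foldl (fun (st : List (List Int) × Int) b =>
            (st.1 ++ [PySem.List.pyRange st.2 (b + 1) 1], b + 1)) (ms, n1)) := by
  intro ns
  induction ns with
  | nil => intro ms n1; rfl
  | cons a t ih =>
    intro ms n1
    by_cases h : c a <;> simp [h, ih]

-- ===== VERDICT (by name: the statement is the Claim_ definition above) =====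
theorem getMatchSlices_spec : Claim_equal_getMatchSlices := by
  intro L _ _
  unfold Spec_getMatchSlices getMatchSlices getMatchSlices_alt
  by_cases hL : L = []
  · subst hL; simp [PySem.List.pyRange_one_eq_nil]
  · have hlen : 0 < L.length := List.length_pos_iff.mpr hL
    simp only [hlen, if_pos, hL, ne_eq, not_false_eq_true, if_pos]
    by_cases hz : (L.headI.length : Int) = 0
    · simp [hz, PySem.List.pyRange_one_eq_nil]
    · rw [if_neg hz]
      have h1 : 1 ≤ (L.headI.length : Int) := by
        have := Int.natCast_nonneg L.headI.length; omega
      rw [pv_fused_eq_twopass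
        (fun n2 => n2 = (L.headI.length : Int) - 1 ∨
          0 < (PySem.List.max? (L.map (fun mc =>
              PySem.List.pyGetD mc (n2 + 1) 0 - PySem.List.pyGetD mc n2 0 - 1)) (fun x => x)).getD 0)]
      -- split the range at the last position and simplify the filter
      have hsplit : PySem.List.pyRange 0 (L.headI.length : Int) 1
          = PySem.List.pyRange 0 ((L.headI.length : Int) - 1) 1 ++ [(L.headI.length : Int) - 1] := by
        rw [PySem.List.pyRange_one_append 0 ((L.headI.length : Int) - 1) (L.headI.length : Int)
          (by omega) (by omega)]
        congr 1
        rw [PySem.List.pyRange_one_cons (by omega),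
          PySem.List.pyRange_one_eq_nil (by omega)]
      have hfilter : (PySem.List.pyRange 0 (L.headI.length : Int) 1).filter
            (fun n2 => decide (n2 = (L.headI.length : Int) - 1 ∨
              0 < (PySem.List.max? (L.map (fun mc =>
                  PySem.List.pyGetD mc (n2 + 1) 0 - PySem.List.pyGetD mc n2 0 - 1)) (fun x => x)).getD 0))
          = (PySem.List.pyRange 0 ((L.headI.length : Int) - 1) 1).filter
              (fun n => decide (∃ mc ∈ L,
                1 < PySem.List.pyGetD mc (n + 1) 0 - PySem.List.pyGetD mc n 0))
            ++ [(L.headI.length : Int) - 1] := by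
        rw [hsplit, List.filter_append]
        congr 1
        · apply List.filter_congr
          intro n hn
          have hn' := (PySem.List.mem_pyRange_one).mp hn
          simp only [decide_eq_decide]
          have hne : ¬ n = (L.headI.length : Int) - 1 := by omega
          rw [pv_cond_iff L hL (fun mc =>
            PySem.List.pyGetD mc (n + 1) 0 - PySem.List.pyGetD mc n 0)]
          tauto
        · simp
      rw [hfilter]
      -- B's sorted break set is exactly that filtered list
      have hsorted : PySem.List.sorted
            (L.foldl (fun s mc =>
              (PySem.List.pyRange 0 ((L.headI.length : Int) - 1) 1).foldl (fun s n =>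
                if 1 < PySem.List.pyGetD mc (n + 1) 0 - PySem.List.pyGetD mc n 0
                then PySem.Set.add s n else s) s) PySem.Set.empty) (fun x => x) false
          = (PySem.List.pyRange 0 ((L.headI.length : Int) - 1) 1).filter
              (fun n => decide (∃ mc ∈ L,
                1 < PySem.List.pyGetD mc (n + 1) 0 - PySem.List.pyGetD mc n 0)) := by
        apply PySem.List.sorted_eq_of_perm_of_pairwise_lt
        · rw [List.perm_ext_iff_of_nodup
            (List.Nodup.filter _ (PySem.List.nodup_pyRange_one _ _))
            (pv_nodup_breaks (fun mc n =>
              1 < PySem.List.pyGetD mc (n + 1) 0 - PySem.List.pyGetD mc n 0)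
              (PySem.List.pyRange 0 ((L.headI.length : Int) - 1) 1) L PySem.Set.empty List.nodup_nil)]
          intro x
          rw [pv_mem_breaks (fun mc n =>
              1 < PySem.List.pyGetD mc (n + 1) 0 - PySem.List.pyGetD mc n 0)
              (PySem.List.pyRange 0 ((L.headI.length : Int) - 1) 1) L PySem.Set.empty x]
          simp only [List.mem_filter, decide_eq_true_eq, PySem.Set.empty, List.not_mem_nil,
            false_or]
        · exact List.Pairwise.filter _ (PySem.List.pairwise_lt_pyRange_one _ _)
      rw [hsorted]
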